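-- pv_equiv track=rewrite | github.com/kiraskywing/Code_Practice | CodeSignal/prefix-palindrome.py | solution
-- ===== SOURCE A (Python) =====
-- def solution(s):
--     n = len(s)
--     left, right = 0, n - 1
--     while left < right:
--
--         while left < right and s[right] != s[left]:
--             right -= 1
--
--         if left < right and s[left:right+1] == s[left:right+1][::-1]:
--             return solution(s[right+1:])
--
--         right -= 1
--
--     return s
-- ===== SOURCE B (Python) =====
-- def solution(s):
--     # Iteratively strip the longest palindromic prefix of length >= 2;
--     # found by scanning candidate lengths upward and keeping the last palindromic one.
--     while True:
--         n = len(s)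
--         best = 0
--         for k in range(2, n + 1):
--             if s[:k] == s[:k][::-1]:
--                 best = k
--         if best == 0:
--             return s
--         s = s[best:]
-- ===== Notes on version B (the rewrite author's own statement) =====
-- stated objective: alternative
-- what changed: B replaces A's recursive early-return with nested two-pointer skip loops and slice comparisons scanning candidate end positions downward by an iterative loop that scans candidate prefix lengths upward, records the longest palindromic prefix, and strips it in place.
import Mathlib
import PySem

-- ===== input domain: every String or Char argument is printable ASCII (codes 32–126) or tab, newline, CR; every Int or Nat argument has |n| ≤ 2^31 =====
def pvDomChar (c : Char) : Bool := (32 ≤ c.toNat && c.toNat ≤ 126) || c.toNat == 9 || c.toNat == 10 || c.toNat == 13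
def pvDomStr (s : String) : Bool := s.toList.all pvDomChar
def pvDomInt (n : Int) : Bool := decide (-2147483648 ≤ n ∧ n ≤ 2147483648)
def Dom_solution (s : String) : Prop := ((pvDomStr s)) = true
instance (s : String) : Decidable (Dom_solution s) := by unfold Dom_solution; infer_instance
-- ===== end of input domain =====

-- B repeatedly strips the longest palindromic prefix found by an upward scan of
-- candidate lengths in an iterative loop, instead of A's recursion with a
-- downward two-pointer skip scan; alternative structure, same asymptotic cost.

-- ===== PORT A =====
-- inner 'while left < right and s[right] != s[left]: right -= 1'
def innerA (l : List Char) (left right : Int) : Int :=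
  if h : left < right ∧ PySem.List.pyGet? l right ≠ PySem.List.pyGet? l left then
    innerA l left (right - 1)
  else right
termination_by (right - left).toNat
decreasing_by omega

-- needed for outerA's termination
theorem innerA_le (l : List Char) (left right : Int) : innerA l left right ≤ right := by
  fun_induction innerA l left right with
  | case1 right h ih => omega
  | case2 right h => omega

-- outer 'while left < right' loop; 'some k' stands for the early 'return solution(s[k:])'
-- (s[left:right+1][::-1] is the slice's reverse: PySem.List.slice?_none_none_neg_one)
def outerA (l : List Char) (left right : Int) : Option Int :=
  if h : left < right then
    let r := innerA l left right
    if left < r ∧ PySem.List.slice l (some left) (some (r + 1)) =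
        (PySem.List.slice l (some left) (some (r + 1))).reverse then
      some (r + 1)
    else
      outerA l left (r - 1)
  else none
termination_by (right - left).toNat
decreasing_by have := innerA_le l left right; omega

-- needed for solA's termination
theorem outerA_some_bounds (l : List Char) (left right k : Int)
    (h : outerA l left right = some k) : left + 2 ≤ k ∧ k ≤ right + 1 := by
  fun_induction outerA l left right generalizing k with
  | case1 right hlr r hcond =>
    simp only [Option.some.injEq] at h
    have hr := innerA_le l left right
    omega
  | case2 right hlr r hcond ih =>
    have hr := innerA_le l left right
    have := ih k h
    omega
  | case3 right hlr => simp at h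

def solA (l : List Char) : List Char :=
  match h : outerA l 0 ((l.length : Int) - 1) with
  | some k => solA (PySem.List.slice l (some k) none)
  | none => l
termination_by l.length
decreasing_by
  obtain ⟨h2, hk⟩ := outerA_some_bounds l 0 ((l.length : Int) - 1) k h
  rw [PySem.List.slice_from l (by omega)]
  simp only [List.length_drop]
  omega

def solution (s : String) : String := String.ofList (solA s.toList)

-- ===== PORT B =====
-- 'best = 0; for k in range(2, n+1): if s[:k] == s[:k][::-1]: best = k'
def bestB (l : List Char) : Int :=
  (PySem.List.pyRange 2 ((l.length : Int) + 1) 1).foldl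
    (fun best k =>
      if PySem.List.slice l none (some k) = (PySem.List.slice l none (some k)).reverse then k
      else best) 0

-- needed for solB's termination
theorem bestB_cases (l : List Char) :
    bestB l = 0 ∨ (2 ≤ bestB l ∧ bestB l ≤ (l.length : Int)) := by
  have key : ∀ (xs : List Int) (a : Int),
      xs.foldl (fun best k =>
        if PySem.List.slice l none (some k) = (PySem.List.slice l none (some k)).reverse then k
        else best) a = a ∨
      xs.foldl (fun best k =>
        if PySem.List.slice l none (some k) = (PySem.List.slice l none (some k)).reverse then k
        else best) a ∈ xs := by
    intro xs
    induction xs with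
    | nil => intro a; left; rfl
    | cons x xs ih =>
      intro a
      simp only [List.foldl_cons]
      rcases ih (if PySem.List.slice l none (some x) =
          (PySem.List.slice l none (some x)).reverse then x else a) with h | h
      · rw [h]
        split
        · right; exact List.mem_cons_self
        · left; rfl
      · right; exact List.mem_cons_of_mem _ h
  rw [bestB]
  rcases key (PySem.List.pyRange 2 ((l.length : Int) + 1) 1) 0 with h | h
  · left; exact h
  · right
    rw [PySem.List.mem_pyRange_one] at h
    omega

-- 'while True: … if best == 0: return s; s = s[best:]'
def solB (l : List Char) : List Char :=
  let best := bestB l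
  if h : best = 0 then l
  else solB (PySem.List.slice l (some best) none)
termination_by l.length
decreasing_by
  rcases bestB_cases l with h0 | ⟨h2, hle⟩
  · exact absurd h0 h
  · rw [PySem.List.slice_from l (by omega)]
    simp only [List.length_drop]
    omega

def solution_alt (s : String) : String := String.ofList (solB s.toList)

-- ===== PRECONDITION & SPEC =====
def Spec_solution (s : String) (out : String) : Prop := out = solution_alt s
instance (s : String) (out : String) : Decidable (Spec_solution s out) := by unfold Spec_solution; infer_instance

-- ===== CLAIM (what is proved, stated in full; the proofs are below) =====
def Claim_equal_solution : Prop := ∀ (s : String), Dom_solution s → Spec_solution s (solution s)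

-- ===== LEMMAS AND PROOFS =====

-- 'the prefix of length k is a palindrome'
def palB (l : List Char) (k : Nat) : Bool := l.take k == (l.take k).reverse

-- greatest k ≤ m with 2 ≤ k and palindromic prefix of length k, else 0
def gp (l : List Char) : Nat → Nat
  | 0 => 0
  | (k+1) => if 1 ≤ k ∧ palB l (k+1) = true then k + 1 else gp l k

theorem gp_skip (l : List Char) (m r : Nat) (hmr : m ≤ r)
    (h : ∀ k, m < k → k ≤ r → ¬(2 ≤ k ∧ palB l k = true)) : gp l r = gp l m := by
  induction r with
  | zero =>
    have hm0 : m = 0 := by omega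
    rw [hm0]
  | succ t ih =>
    rcases Nat.eq_or_lt_of_le hmr with heq | hlt
    · rw [heq]
    · have hm : m ≤ t := by omega
      rw [gp]
      have hnot := h (t + 1) (by omega) (by omega)
      rw [if_neg (by intro ⟨h1, h2⟩; exact hnot ⟨by omega, h2⟩)]
      exact ih hm (fun k hk1 hk2 => h k hk1 (by omega))

theorem gp_eq_of (l : List Char) (k0 r : Nat) (h2 : 2 ≤ k0) (hp : palB l k0 = true)
    (hk0r : k0 ≤ r) (hmax : ∀ k, k0 < k → k ≤ r → ¬(2 ≤ k ∧ palB l k = true)) :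
    gp l r = k0 := by
  rw [gp_skip l k0 r hk0r hmax]
  obtain ⟨t, rfl⟩ : ∃ t, k0 = t + 1 := ⟨k0 - 1, by omega⟩
  rw [gp, if_pos ⟨by omega, hp⟩]

theorem pal_endpoint (l : List Char) (j : Nat) (hj : j < l.length)
    (hp : palB l (j+1) = true) : l[j]? = l[0]? := by
  rw [palB, beq_iff_eq] at hp
  have hlen : (l.take (j+1)).length = j + 1 := by
    rw [List.length_take]; omega
  have h1 : l[j]? = (l.take (j+1))[j]? := by
    rw [List.getElem?_take_of_lt (by omega)]
  have h2 : l[0]? = (l.take (j+1))[0]? := by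
    rw [List.getElem?_take_of_lt (by omega)]
  rw [h1, h2]
  conv_lhs => rw [hp]
  rw [List.getElem?_reverse (by omega), hlen]
  congr 1
  omega

theorem innerA_spec (l : List Char) (r : Nat) :
    ∃ m : Nat, innerA l 0 (r : Int) = (m : Int) ∧ m ≤ r ∧
      (∀ j : Nat, m < j → j ≤ r → l[j]? ≠ l[0]?) ∧ (0 < m → l[m]? = l[0]?) := by
  induction r with
  | zero =>
    refine ⟨0, ?_, le_refl _, by omega, by omega⟩
    rw [innerA, dif_neg (by simp)]
  | succ t ih =>
    have hcast : ((t + 1 : Nat) : Int) = (t : Int) + 1 := by push_cast; ring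
    have hget : PySem.List.pyGet? l ((t + 1 : Nat) : Int) = l[t+1]? :=
      PySem.List.pyGet?_natCast l (t+1)
    have hget0 : PySem.List.pyGet? l 0 = l[0]? := PySem.List.pyGet?_zero l
    by_cases hne : l[t+1]? = l[0]?
    · refine ⟨t + 1, ?_, le_refl _, by omega, fun _ => hne⟩
      rw [innerA, dif_neg]
      intro ⟨h1, h2⟩
      exact h2 (by rw [hget, hget0]; exact hne)
    · obtain ⟨m, hm, hmt, hskip, heq⟩ := ih
      refine ⟨m, ?_, by omega, ?_, heq⟩
      · rw [innerA, dif_pos ⟨by exact_mod_cast Nat.succ_pos t, by rw [hget, hget0]; exact hne⟩]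
        rw [show ((t + 1 : Nat) : Int) - 1 = (t : Int) by omega]
        exact hm
      · intro j hj1 hj2
        rcases Nat.lt_or_ge j (t+1) with h | h
        · exact hskip j hj1 (by omega)
        · have : j = t + 1 := by omega
          rw [this]; exact hne

theorem outerA_char (l : List Char) (r : Nat) (hr : r ≤ l.length) :
    outerA l 0 ((r : Int) - 1) = (if gp l r = 0 then none else some ((gp l r : Nat) : Int)) := by
  induction r using Nat.strong_induction_on with
  | _ r IH =>
  match r with
  | 0 =>
    rw [outerA, dif_neg (by omega)]
    simp [gp]
  | 1 =>
    rw [outerA, dif_neg (by norm_num)]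
    simp [gp]
  | (t+2) =>
    have hcast : ((t + 2 : Nat) : Int) - 1 = ((t + 1 : Nat) : Int) := by push_cast; ring
    rw [outerA, dif_pos (by rw [hcast]; exact_mod_cast Nat.succ_pos t)]
    rw [hcast]
    obtain ⟨m, hm, hmt, hskip, hmeq⟩ := innerA_spec l (t+1)
    rw [hm]
    have hslice : PySem.List.slice l (some 0) (some ((m : Int) + 1)) = l.take (m+1) := by
      rw [PySem.List.slice_zero_start, show ((m:Int)+1) = ((m+1 : Nat) : Int) by push_cast; ring,
        PySem.List.slice_to_natCast]
    by_cases hcond : 0 < (m : Int) ∧ PySem.List.slice l (some 0) (some ((m : Int) + 1)) =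
        (PySem.List.slice l (some 0) (some ((m : Int) + 1))).reverse
    · rw [if_pos hcond]
      have hpal : palB l (m+1) = true := by
        rw [palB, beq_iff_eq]
        have := hcond.2
        rwa [hslice] at this
      have hg : gp l (t+2) = m + 1 := by
        apply gp_eq_of l (m+1) (t+2) (by omega) hpal (by omega)
        intro k hk1 hk2 ⟨_, hkpal⟩
        obtain ⟨j, rfl⟩ : ∃ j, k = j + 1 := ⟨k - 1, by omega⟩
        exact hskip j (by omega) (by omega) (pal_endpoint l j (by omega) hkpal)
      rw [hg, if_neg (by omega)]
      push_cast
      ring_nf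
    · rw [if_neg hcond]
      have hstep : ((m : Int) - 1) = ((m : Nat) : Int) - 1 := rfl
      have hrec := IH m (by omega) (by omega)
      rw [hrec]
      have hg : gp l (t+2) = gp l m := by
        apply gp_skip l m (t+2) (by omega)
        intro k hk1 hk2 ⟨hk3, hkpal⟩
        obtain ⟨j, rfl⟩ : ∃ j, k = j + 1 := ⟨k - 1, by omega⟩
        rcases Nat.lt_or_ge m j with hmj | hmj
        · exact hskip j hmj (by omega) (pal_endpoint l j (by omega) hkpal)
        · have hjm : j = m := by omega
          subst hjm
          apply hcond
          constructor
          · omega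
          · rw [hslice]
            rw [palB, beq_iff_eq] at hkpal
            exact hkpal
      rw [hg]

theorem bestB_eq_gp (l : List Char) : bestB l = ((gp l l.length : Nat) : Int) := by
  suffices h : ∀ m : Nat, (PySem.List.pyRange 2 ((m : Int) + 1) 1).foldl
      (fun best k =>
        if PySem.List.slice l none (some k) = (PySem.List.slice l none (some k)).reverse then k
        else best) 0 = ((gp l m : Nat) : Int) by
    exact h l.length
  intro m
  induction m with
  | zero =>
    rw [PySem.List.pyRange_one_eq_nil (by norm_num)]
    simp [gp]
  | succ t ih =>
    match t, ih with
    | 0, _ =>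
      rw [PySem.List.pyRange_one_eq_nil (by norm_num)]
      simp [gp]
    | (u+1), ih =>
      rw [show ((u + 1 + 1 : Nat) : Int) + 1 = (((u+1 : Nat) : Int) + 1) + 1 by push_cast; ring,
        PySem.List.pyRange_one_succ_right (by push_cast; omega), List.foldl_append, ih]
      simp only [List.foldl_cons, List.foldl_nil]
      rw [show ((u+1 : Nat) : Int) + 1 = ((u + 2 : Nat) : Int) by push_cast; ring,
        PySem.List.slice_to_natCast]
      rw [show gp l (u+2) = if 1 ≤ u + 1 ∧ palB l (u+2) = true then u + 2 else gp l (u+1) from rfl]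
      by_cases hp : palB l (u+2) = true
      · rw [if_pos, if_pos ⟨by omega, hp⟩]
        rw [palB, beq_iff_eq] at hp
        exact hp
      · rw [if_neg, if_neg (by intro ⟨_, h⟩; exact hp h)]
        rw [palB, beq_iff_eq] at hp
        exact hp

theorem sol_step (l : List Char)
    (IH : ∀ l' : List Char, l'.length < l.length → solA l' = solB l') :
    solA l = solB l := by
  have hchar := outerA_char l l.length le_rfl
  have hb := bestB_eq_gp l
  rw [solA, solB]
  split
  · rename_i k heq
    have hbounds := outerA_some_bounds l 0 ((l.length : Int) - 1) k heq
    rw [hchar] at heq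
    by_cases hg : gp l l.length = 0
    · rw [if_pos hg] at heq
      exact absurd heq (by simp)
    · rw [if_neg hg] at heq
      have hk : k = ((gp l l.length : Nat) : Int) := by
        simpa using heq.symm
      rw [dif_neg (by rw [hb]; exact_mod_cast hg)]
      rw [hb, ← hk]
      apply IH
      rw [PySem.List.slice_from l (by omega)]
      simp only [List.length_drop]
      omega
  · rename_i heq
    rw [hchar] at heq
    by_cases hg : gp l l.length = 0
    · rw [dif_pos (by rw [hb, hg]; rfl)]
    · rw [if_neg hg] at heq
      exact absurd heq (by simp)

theorem solA_eq_solB (l : List Char) : solA l = solB l := by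
  suffices h : ∀ (n : Nat) (l : List Char), l.length < n → solA l = solB l from
    h (l.length + 1) l (by omega)
  intro n
  induction n with
  | zero => intro l hl; omega
  | succ n ih =>
    intro l hl
    exact sol_step l (fun l' hl' => ih l' (by omega))

-- ===== VERDICT (by name: the statement is the Claim_ definition above) =====
theorem solution_spec : Claim_equal_solution := by
  intro s _
  unfold Spec_solution solution solution_alt
  rw [solA_eq_solB s.toList]
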